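-- pv_equiv track=rewrite | github.com/DannyDaoBoYang/aptos-core | third_party/move/move-examples/experimental/basic-coin/inputGeneration.py | generate_node_fields
-- ===== SOURCE A (Python) =====
-- def generate_node_fields(n):
--     """Generate field definitions for the Node struct"""
--     result = ""
--     for i in range(n):
--         if i % 4 == 0:
--             result += "        "
--         result += f"v{i}: u64"
--         if i < n - 1:
--             result += ", "
--             if (i + 1) % 4 == 0:
--                 result += "\n"
--         else:
--             result += ",\n"
--     return result
-- ===== SOURCE B (Python) =====
-- def generate_node_fields(n):
--     """Generate field definitions for the Node struct"""
--     parts = []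
--     start = 0
--     while start < n:
--         end = min(start + 4, n)
--         parts.append("        " + ", ".join(f"v{i}: u64" for i in range(start, end)))
--         start = end
--     return ", \n".join(parts) + ",\n" if parts else ""
-- ===== Notes on version B (the rewrite author's own statement) =====
-- stated objective: simpler
-- what changed: A builds the string index by index with three modular/boundary conditionals per field; B decomposes the output into rows of four fields, joining each row's items with ', ' and each pair of rows with ', \n', appending the single final ',\n' once.
import Mathlib
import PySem

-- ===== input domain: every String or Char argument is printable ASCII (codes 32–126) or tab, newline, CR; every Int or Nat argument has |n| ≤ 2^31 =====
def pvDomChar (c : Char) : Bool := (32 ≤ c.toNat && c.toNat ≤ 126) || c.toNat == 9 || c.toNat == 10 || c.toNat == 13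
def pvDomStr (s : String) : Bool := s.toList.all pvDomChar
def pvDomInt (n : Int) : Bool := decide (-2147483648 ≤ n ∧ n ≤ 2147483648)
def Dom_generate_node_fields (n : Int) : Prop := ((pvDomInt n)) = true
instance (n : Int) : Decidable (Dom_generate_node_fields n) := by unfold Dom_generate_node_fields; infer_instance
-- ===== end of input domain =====

-- B replaces A's per-index loop with per-index conditional terminators by a recursion over rows of
-- four indices, joining each row's items with ", " and appending one terminator per row (simpler decomposition).

-- ===== PORT A =====
def generate_node_fields (n : Int) : String :=
  (PySem.List.pyRange 0 n 1).foldl (fun result i =>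
    let result := if PySem.Int.mod i 4 = 0 then result ++ "        " else result
    let result := result ++ "v" ++ PySem.Int.toStr i ++ ": u64"
    if i < n - 1 then
      let result := result ++ ", "
      if PySem.Int.mod (i + 1) 4 = 0 then result ++ "\n" else result
    else
      result ++ ",\n") ""

-- ===== PORT B =====
-- the while loop of Source B collecting `parts` (one string per row of up to four fields):
-- each iteration appends one row and advances start to end; modelled as a recursion on start
def generate_node_fields_parts (n start : Int) : List String :=
  if start ≥ n then []
  else
    ("        " ++ PySem.Str.join ", "
      ((PySem.List.pyRange start (min (start + 4) n) 1).map (fun i => "v" ++ PySem.Int.toStr i ++ ": u64")))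
    :: generate_node_fields_parts n (min (start + 4) n)
termination_by (n - start).toNat
decreasing_by simp only [not_le] at *; omega

def generate_node_fields_alt (n : Int) : String :=
  let parts := generate_node_fields_parts n 0
  if parts = [] then "" else PySem.Str.join ", \n" parts ++ ",\n"

-- ===== PRECONDITION & SPEC =====
def Spec_generate_node_fields (n : Int) (out : String) : Prop := out = generate_node_fields_alt n
instance (n : Int) (out : String) : Decidable (Spec_generate_node_fields n out) := by unfold Spec_generate_node_fields; infer_instance

-- ===== CLAIM (what is proved, stated in full; the proofs are below) =====
def Claim_equal_generate_node_fields : Prop := ∀ (n : Int), Dom_generate_node_fields n → Spec_generate_node_fields n (generate_node_fields n)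

-- ===== LEMMAS AND PROOFS =====

-- one field item "v{i}: u64"
def pvItem (i : Int) : String := "v" ++ PySem.Int.toStr i ++ ": u64"

-- what A's loop body appends for index i (terminators as single literals)
def pvPiece (n i : Int) : String :=
  (if PySem.Int.mod i 4 = 0 then "        " else "") ++ pvItem i ++
  (if i < n - 1 then (if PySem.Int.mod (i + 1) 4 = 0 then ", \n" else ", ") else ",\n")

-- concatenation of the pieces of a list of indices
def pvCat (f : Int → String) : List Int → String
  | [] => ""
  | x :: xs => f x ++ pvCat f xs

lemma pvCat_append (f : Int → String) (l₁ l₂ : List Int) :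
    pvCat f (l₁ ++ l₂) = pvCat f l₁ ++ pvCat f l₂ := by
  induction l₁ with
  | nil => apply String.toList_inj.mp; simp [pvCat]
  | cons x xs ih => apply String.toList_inj.mp; simp [pvCat, ih]

lemma pvBodyA (n i : Int) (r : String) :
    (let result := if PySem.Int.mod i 4 = 0 then r ++ "        " else r
     let result := result ++ "v" ++ PySem.Int.toStr i ++ ": u64"
     if i < n - 1 then
       let result := result ++ ", "
       if PySem.Int.mod (i + 1) 4 = 0 then result ++ "\n" else result
     else
       result ++ ",\n") = r ++ pvPiece n i := by
  apply String.toList_inj.mp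
  simp only [pvPiece, pvItem]
  split_ifs <;> simp [String.toList_append]

lemma pvFoldA (n : Int) : ∀ (l : List Int) (s : String),
    l.foldl (fun result i =>
      let result := if PySem.Int.mod i 4 = 0 then result ++ "        " else result
      let result := result ++ "v" ++ PySem.Int.toStr i ++ ": u64"
      if i < n - 1 then
        let result := result ++ ", "
        if PySem.Int.mod (i + 1) 4 = 0 then result ++ "\n" else result
      else
        result ++ ",\n") s = s ++ pvCat (pvPiece n) l := by
  intro l
  induction l with
  | nil => intro s; apply String.toList_inj.mp; simp [pvCat]
  | cons x xs ih =>
      intro s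
      simp only [List.foldl_cons]
      rw [ih, pvBodyA n x s]
      apply String.toList_inj.mp
      simp [pvCat]

lemma pvA_eq (n : Int) :
    generate_node_fields n = pvCat (pvPiece n) (PySem.List.pyRange 0 n 1) := by
  unfold generate_node_fields
  rw [pvFoldA]
  apply String.toList_inj.mp
  simp

-- small literal ranges
lemma pvRange1 (s : Int) : PySem.List.pyRange s (s+1) 1 = [s] := PySem.List.pyRange_one_singleton s
lemma pvRange2 (s : Int) : PySem.List.pyRange s (s+2) 1 = [s, s+1] := by
  rw [PySem.List.pyRange_one_cons (by omega), show s+2 = (s+1)+1 by ring,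
    PySem.List.pyRange_one_singleton]
lemma pvRange3 (s : Int) : PySem.List.pyRange s (s+3) 1 = [s, s+1, s+2] := by
  rw [PySem.List.pyRange_one_cons (by omega), show s+3 = (s+1)+2 by ring, pvRange2]
  simp only [List.cons.injEq, and_true, true_and]; omega
lemma pvRange4 (s : Int) : PySem.List.pyRange s (s+4) 1 = [s, s+1, s+2, s+3] := by
  rw [PySem.List.pyRange_one_cons (by omega), show s+4 = (s+1)+3 by ring, pvRange3]
  simp only [List.cons.injEq, and_true, true_and]; omega

-- a full row that is NOT the last one: terminator ", \n"
lemma pvChunkFull (start n : Int) (h4 : (4:Int) ∣ start) (hn : start + 4 < n) :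
    (("        " ++ PySem.Str.join ", "
        ((PySem.List.pyRange start (start+4) 1).map (fun i => "v" ++ PySem.Int.toStr i ++ ": u64"))) ++ ", \n")
    = pvCat (pvPiece n) (PySem.List.pyRange start (start+4) 1) := by
  rw [pvRange4]
  apply String.toList_inj.mp
  simp [pvCat, pvPiece, pvItem, h4,
    show ¬ (4:Int) ∣ (start+1) by omega, show ¬ (4:Int) ∣ (start+1+1) by omega,
    show ¬ (4:Int) ∣ (start+2) by omega, show ¬ (4:Int) ∣ (start+2+1) by omega,
    show ¬ (4:Int) ∣ (start+3) by omega, show (4:Int) ∣ (start+3+1) by omega,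
    PySem.Str.toList_join, PySem.Chars.join_cons_cons, PySem.Chars.join_singleton,
    show start < n - 1 by omega, show start+1 < n - 1 by omega,
    show start+2 < n - 1 by omega, show start+3 < n - 1 by omega]

-- the LAST row, with 1..4 items: terminator ",\n"
lemma pvChunkLast1 (start : Int) (h4 : (4:Int) ∣ start) :
    (("        " ++ PySem.Str.join ", "
        ((PySem.List.pyRange start (start+1) 1).map (fun i => "v" ++ PySem.Int.toStr i ++ ": u64"))) ++ ",\n")
    = pvCat (pvPiece (start+1)) (PySem.List.pyRange start (start+1) 1) := by
  rw [pvRange1]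
  apply String.toList_inj.mp
  simp [pvCat, pvPiece, pvItem, h4, PySem.Str.toList_join, PySem.Chars.join_singleton]

lemma pvChunkLast2 (start : Int) (h4 : (4:Int) ∣ start) :
    (("        " ++ PySem.Str.join ", "
        ((PySem.List.pyRange start (start+2) 1).map (fun i => "v" ++ PySem.Int.toStr i ++ ": u64"))) ++ ",\n")
    = pvCat (pvPiece (start+2)) (PySem.List.pyRange start (start+2) 1) := by
  rw [pvRange2]
  apply String.toList_inj.mp
  simp [pvCat, pvPiece, pvItem, h4,
    show ¬ (4:Int) ∣ (start+1) by omega,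
    PySem.Str.toList_join, PySem.Chars.join_cons_cons, PySem.Chars.join_singleton,
    show start < start + 2 - 1 by omega, show ¬(start+1 < start + 2 - 1) by omega]

lemma pvChunkLast3 (start : Int) (h4 : (4:Int) ∣ start) :
    (("        " ++ PySem.Str.join ", "
        ((PySem.List.pyRange start (start+3) 1).map (fun i => "v" ++ PySem.Int.toStr i ++ ": u64"))) ++ ",\n")
    = pvCat (pvPiece (start+3)) (PySem.List.pyRange start (start+3) 1) := by
  rw [pvRange3]
  apply String.toList_inj.mp
  simp [pvCat, pvPiece, pvItem, h4,
    show ¬ (4:Int) ∣ (start+1) by omega, show ¬ (4:Int) ∣ (start+1+1) by omega,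
    show ¬ (4:Int) ∣ (start+2) by omega,
    PySem.Str.toList_join, PySem.Chars.join_cons_cons, PySem.Chars.join_singleton,
    show start < start + 3 - 1 by omega, show start+1 < start + 3 - 1 by omega,
    show ¬(start+2 < start + 3 - 1) by omega]

lemma pvChunkLast4 (start : Int) (h4 : (4:Int) ∣ start) :
    (("        " ++ PySem.Str.join ", "
        ((PySem.List.pyRange start (start+4) 1).map (fun i => "v" ++ PySem.Int.toStr i ++ ": u64"))) ++ ",\n")
    = pvCat (pvPiece (start+4)) (PySem.List.pyRange start (start+4) 1) := by
  rw [pvRange4]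
  apply String.toList_inj.mp
  simp [pvCat, pvPiece, pvItem, h4,
    show ¬ (4:Int) ∣ (start+1) by omega, show ¬ (4:Int) ∣ (start+1+1) by omega,
    show ¬ (4:Int) ∣ (start+2) by omega, show ¬ (4:Int) ∣ (start+2+1) by omega,
    show ¬ (4:Int) ∣ (start+3) by omega,
    PySem.Str.toList_join, PySem.Chars.join_cons_cons, PySem.Chars.join_singleton,
    show start < start + 4 - 1 by omega, show start+1 < start + 4 - 1 by omega,
    show start+2 < start + 4 - 1 by omega, show ¬(start+3 < start + 4 - 1) by omega]

-- Str-level join unfoldings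
lemma pvJoin1 (sep r : String) : PySem.Str.join sep [r] = r := by
  apply String.toList_inj.mp
  simp [PySem.Str.toList_join, PySem.Chars.join_singleton]

lemma pvJoin2 (sep r q : String) (rest : List String) :
    PySem.Str.join sep (r :: q :: rest) = (r ++ sep) ++ PySem.Str.join sep (q :: rest) := by
  apply String.toList_inj.mp
  simp [PySem.Str.toList_join, PySem.Chars.join_cons_cons]

lemma pvStr_append_assoc (a b c : String) : (a ++ b) ++ c = a ++ (b ++ c) := by
  apply String.toList_inj.mp
  simp

lemma pvParts_eq (n : Int) : ∀ (m : Nat) (start : Int), 0 ≤ start → 4 ∣ start →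
    (n - start).toNat ≤ m → start < n →
    PySem.Str.join ", \n" (generate_node_fields_parts n start) ++ ",\n"
      = pvCat (pvPiece n) (PySem.List.pyRange start n 1) := by
  intro m
  induction m with
  | zero => intro start _ _ hm hlt; omega
  | succ m ih =>
      intro start h0 h4 hm hlt
      rw [generate_node_fields_parts, if_neg (by omega)]
      by_cases he : min (start + 4) n = n
      · -- last row: the next call returns [], parts is a singleton
        rw [he, generate_node_fields_parts, if_pos (by omega), pvJoin1]
        have hk : n = start + 1 ∨ n = start + 2 ∨ n = start + 3 ∨ n = start + 4 := by omega
        rcases hk with h | h | h | h <;> subst h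
        · exact pvChunkLast1 start h4
        · exact pvChunkLast2 start h4
        · exact pvChunkLast3 start h4
        · exact pvChunkLast4 start h4
      · -- a full row followed by at least one further row
        have he4 : min (start + 4) n = start + 4 := by omega
        have hlt4 : start + 4 < n := by omega
        rw [he4]
        obtain ⟨q, rest, hqr⟩ :
            ∃ q rest, generate_node_fields_parts n (start + 4) = q :: rest :=
          ⟨_, _, by rw [generate_node_fields_parts, if_neg (by omega)]⟩
        rw [hqr, pvJoin2, pvStr_append_assoc, ← hqr,
          ih (start + 4) (by omega) (by omega) (by omega) hlt4,
          PySem.List.pyRange_one_append start (start + 4) n (by omega) (by omega),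
          pvCat_append, ← pvChunkFull start n h4 hlt4, pvStr_append_assoc]

-- ===== VERDICT (by name: the statement is the Claim_ definition above) =====
theorem generate_node_fields_spec : Claim_equal_generate_node_fields := by
  intro n _
  unfold Spec_generate_node_fields generate_node_fields_alt
  simp only []
  by_cases hn : 0 < n
  · rw [if_neg (by rw [generate_node_fields_parts, if_neg (by omega)]; simp),
      pvA_eq, pvParts_eq n (n - 0).toNat 0 (by omega) (by omega) (by omega) hn]
  · rw [if_pos (by rw [generate_node_fields_parts, if_pos (by omega)]),
      pvA_eq, PySem.List.pyRange_one_eq_nil (by omega)]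
    rfl
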